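-- pv_equiv track=rewrite | github.com/benedictjones/EiM_MaterialProxy | mod_material/spice/GenerateRN.py | calc_num_conn
-- ===== SOURCE A (Python) =====
-- def calc_num_conn(num_node):
--
--     if num_node == 1:
--         return 0
--
--     sum = 0
--     if num_node >= 3:
--         for i in range(num_node-2):  # sum from 1 to (N-3)
--             sum = sum + i
--     num_conn = num_node + (num_node-3) + sum
--
--     return num_conn
-- ===== SOURCE B (Python) =====
-- def calc_num_conn(num_node):
--     if num_node == 1:
--         return 0
--     if num_node >= 3:
--         return num_node + (num_node - 3) + (num_node - 3) * (num_node - 2) // 2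
--     return 2 * num_node - 3
-- ===== Notes on version B (the rewrite author's own statement) =====
-- stated objective: simpler
-- what changed: Replaced the accumulation loop over range(num_node-2) with the arithmetic-series closed form (num_node-3)*(num_node-2)//2.
import Mathlib
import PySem

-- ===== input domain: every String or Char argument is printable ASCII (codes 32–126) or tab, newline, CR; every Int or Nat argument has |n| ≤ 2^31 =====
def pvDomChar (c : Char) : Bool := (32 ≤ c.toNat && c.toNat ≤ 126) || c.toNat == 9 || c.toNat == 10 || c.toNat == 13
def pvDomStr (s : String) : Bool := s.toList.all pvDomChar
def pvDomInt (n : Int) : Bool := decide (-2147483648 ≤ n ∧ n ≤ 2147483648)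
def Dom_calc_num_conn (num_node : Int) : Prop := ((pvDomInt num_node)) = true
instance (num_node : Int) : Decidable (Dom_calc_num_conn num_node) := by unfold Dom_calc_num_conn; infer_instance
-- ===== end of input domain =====

-- B replaces A's summation loop with the arithmetic-series closed form (simpler, O(1)).

-- ===== PORT A =====
def calc_num_conn (num_node : Int) : Int :=
  if num_node == 1 then 0
  else
    let sum : Int :=
      if num_node ≥ 3 then
        (PySem.List.pyRange 0 (num_node - 2) 1).foldl (fun s i => s + i) 0
      else 0
    num_node + (num_node - 3) + sum

-- ===== PORT B =====
def calc_num_conn_alt (num_node : Int) : Int :=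
  if num_node == 1 then 0
  else if num_node ≥ 3 then
    num_node + (num_node - 3) + PySem.Int.floordiv ((num_node - 3) * (num_node - 2)) 2
  else 2 * num_node - 3

-- ===== PRECONDITION & SPEC =====
def Spec_calc_num_conn (num_node : Int) (out : Int) : Prop := out = calc_num_conn_alt num_node
instance (num_node : Int) (out : Int) : Decidable (Spec_calc_num_conn num_node out) := by unfold Spec_calc_num_conn; infer_instance

-- ===== CLAIM (what is proved, stated in full; the proofs are below) =====
def Claim_equal_calc_num_conn : Prop := ∀ (num_node : Int), Dom_calc_num_conn num_node → Spec_calc_num_conn num_node (calc_num_conn num_node)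

-- ===== LEMMAS AND PROOFS =====

-- sum of 0..(m-1) as a foldl over pyRange, closed form
theorem pv_sum_pyRange (m : Nat) :
    (PySem.List.pyRange 0 (m : Int) 1).foldl (fun s i => s + i) 0 = (m : Int) * ((m : Int) - 1) / 2 := by
  induction m with
  | zero => simp [PySem.List.pyRange_one_eq_nil]
  | succ k ih =>
    have h : (0 : Int) ≤ (k : Int) := by positivity
    have : ((k + 1 : Nat) : Int) = (k : Int) + 1 := by push_cast; ring
    rw [this, PySem.List.pyRange_one_succ_right h, List.foldl_append, ih]
    simp only [List.foldl_cons, List.foldl_nil]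
    have h2 : ((k : Int) + 1) * ((k : Int) + 1 - 1) = (k : Int) * ((k : Int) - 1) + 2 * (k : Int) := by ring
    omega

-- ===== VERDICT (by name: the statement is the Claim_ definition above) =====
theorem calc_num_conn_spec : Claim_equal_calc_num_conn := by
  intro n _
  unfold Spec_calc_num_conn calc_num_conn calc_num_conn_alt
  dsimp only
  by_cases h1 : n = 1
  · simp [h1]
  · simp only [beq_iff_eq]
    rw [if_neg h1, if_neg h1]
    by_cases h3 : n ≥ 3
    · have hm : n - 2 = ((n - 2).toNat : Int) := by omega
      rw [if_pos h3, if_pos h3, hm, pv_sum_pyRange, ← hm]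
      have key : (n - 2) * ((n - 2) - 1) = (n - 3) * (n - 2) := by ring
      simp only [PySem.Int.floordiv]
      have hf : ((n - 3) * (n - 2)).fdiv 2 = (n - 3) * (n - 2) / 2 := by
        rw [Int.fdiv_eq_ediv]; norm_num
      rw [hf]
      omega
    · rw [if_neg h3, if_neg h3]
      omega
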